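-- pv_equiv track=rewrite | github.com/Yoonhyungseon/codeReview | pythonWorkspace/백준/연속된곱.py | solution
-- ===== SOURCE A (Python) =====
-- def solution(n):
--
--     na=[]
--     for k in range(1,100):
--         answer = 0 # 구하고자하는 값 answer을 0으로 초기화
--
--         for i in range(1, k + 1): # 어떤 자연수 부터 시작할지 결정하는 반복문
--             sum = 1 #총합을 초기화, 초기화하는 위치가 중요하다.
--
--             for j in range(i, k + 1): #i부터 시작해서 어디까지 더할지 결정하는 반복문
--                 sum = sum * j  #sum에 j값을 계속 더 해줘서 총합을 구해준다.
--
--                 if sum == k:  # 그 총합이 구하고자하는 n 값이 되면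
--                     answer = answer + 1 #answer(연속 되는 자연수들도 몇 번 표현할 수 있는지)를 1올려주고
--                     break  #한 번 찾았으면 그 이 후에는 더 나올 수 없으므로 반복문을 깨준다.
--
--                 if sum > k:
--                     break #같은 원리로 수가 더 커져버리면 찾을 가능성이 없으므로 반복문을 깨준다.
--
--         if answer-1 != 0 :
--             na.append(k)
--
--     return na[n-1]
-- ===== SOURCE B (Python) =====
-- def solution(n):
--     # generate-and-tally: enumerate all consecutive products up to 99 once,
--     # then filter the values representable more than once (single term i=j included).
--     tally = {}
--     for i in range(1, 100):
--         p = 1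
--         for j in range(i, 100):
--             p *= j
--             if p > 99:
--                 break
--             tally[p] = tally.get(p, 0) + 1
--     na = [k for k in range(1, 100) if tally.get(k, 0) != 1]
--     return na[n - 1]
-- ===== Notes on version B (the rewrite author's own statement) =====
-- stated objective: faster
-- what changed: Replaces the target-centric triple-nested scan (for each k, retry every start i and re-multiply from scratch) by one generate-and-tally pass over all consecutive products with a running product, then a filter over 1..99.
import Mathlib
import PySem

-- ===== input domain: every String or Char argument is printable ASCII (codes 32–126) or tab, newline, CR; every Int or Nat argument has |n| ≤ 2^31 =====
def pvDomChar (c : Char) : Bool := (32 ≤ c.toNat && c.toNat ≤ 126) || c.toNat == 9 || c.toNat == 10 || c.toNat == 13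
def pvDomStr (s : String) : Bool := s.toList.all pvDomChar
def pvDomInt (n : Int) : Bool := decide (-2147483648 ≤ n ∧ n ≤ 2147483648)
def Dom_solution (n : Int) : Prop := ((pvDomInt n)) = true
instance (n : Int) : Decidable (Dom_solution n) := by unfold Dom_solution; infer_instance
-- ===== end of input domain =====

-- B replaces A's triple-nested target-centric scan by one generate-and-tally pass
-- over all consecutive products plus a filter (objective: faster, constant factor).

-- ===== PORT A =====
-- inner j-loop: returns 1 iff the running product starting at value s over js hits k (break on == and >)
def pvInnerA (k : Int) : List Int → Int → Int
  | [], _ => 0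
  | j :: rest, s =>
    let s' := s * j
    if s' = k then 1
    else if s' > k then 0
    else pvInnerA k rest s'

def pvAnswerA (k : Int) : Int :=
  (PySem.List.pyRange 1 (k + 1) 1).foldl
    (fun acc i => acc + pvInnerA k (PySem.List.pyRange i (k + 1) 1) 1) 0

def pvNaA : List Int :=
  (PySem.List.pyRange 1 100 1).foldl
    (fun na k => if pvAnswerA k - 1 ≠ 0 then na ++ [k] else na) []

def solution (n : Int) : Int := (PySem.List.pyGet? pvNaA (n - 1)).getD 0

-- ===== PORT B =====
-- inner j-loop of B: running product p over js, tallying each product ≤ 99 (break on p > 99)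
def pvInnerB : PySem.Dict Int Int → Int → List Int → PySem.Dict Int Int
  | t, _, [] => t
  | t, p, j :: rest =>
    let p' := p * j
    if p' > 99 then t
    else pvInnerB (t.insert p' (t.getD p' 0 + 1)) p' rest

def pvTallyB : PySem.Dict Int Int :=
  (PySem.List.pyRange 1 100 1).foldl
    (fun t i => pvInnerB t 1 (PySem.List.pyRange i 100 1)) PySem.Dict.empty

def pvNaB : List Int :=
  (PySem.List.pyRange 1 100 1).filter (fun k => pvTallyB.getD k 0 ≠ 1)

def solution_alt (n : Int) : Int := (PySem.List.pyGet? pvNaB (n - 1)).getD 0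

-- ===== PRECONDITION & SPEC =====
-- Python A raises IndexError when n-1 is outside the valid (negative-wrap) index range of the
-- 11-element result list; Pre_ admits exactly the indices on which A returns.
def Pre_solution (n : Int) : Prop := -10 ≤ n ∧ n ≤ 11
instance (n : Int) : Decidable (Pre_solution n) := by unfold Pre_solution; infer_instance
def pvWitness_solution : Int := 3

def Spec_solution (n : Int) (out : Int) : Prop := out = solution_alt n
instance (n : Int) (out : Int) : Decidable (Spec_solution n out) := by unfold Spec_solution; infer_instance

-- ===== CLAIM (what is proved, stated in full; the proofs are below) =====
def Claim_equal_solution : Prop := ∀ (n : Int), Dom_solution n → Pre_solution n → Spec_solution n (solution n)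

-- ===== LEMMAS AND PROOFS =====
-- the two precomputed tables coincide
set_option maxRecDepth 4000 in
theorem pvNa_eq : pvNaA = pvNaB := by decide

-- ===== VERDICT (by name: the statement is the Claim_ definition above) =====
theorem solution_spec : Claim_equal_solution := by
  intro n _ _
  unfold Spec_solution solution solution_alt
  rw [pvNa_eq]
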